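-- pv_equiv track=rewrite | github.com/MarcinSerafin03/bit-algo-start-24-25-WDI | Zadania przed Kolokwium 1 - kiedys to posprzatam/zad_1_niewiadomo.py | decimal_to_base4
-- ===== SOURCE A (Python) =====
-- def decimal_to_base4(number):
--     base4 = 0
--     multiplier = 1
--
--     while number > 0:
--         remainder = number % 4
--         base4 += remainder * multiplier
--         number //= 4
--         multiplier *= 10
--
--     return base4
-- ===== SOURCE B (Python) =====
-- def decimal_to_base4(number):
--     # MSD-first conversion: find the largest power of 4 not exceeding number,
--     # then emit digits from the most significant end downwards.
--     if number <= 0: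
--         return 0
--     power = 1
--     while power * 4 <= number:
--         power *= 4
--     result = 0
--     while power >= 1:
--         result = result * 10 + number // power
--         number %= power
--         power //= 4
--     return result
-- ===== Notes on version B (the rewrite author's own statement) =====
-- stated objective: alternative
-- what changed: Replaces A's LSB-first loop (accumulating remainder*multiplier with a growing power-of-10 multiplier) by an MSD-first conversion: find the largest power of 4 <= number, then emit quotient digits from the top down via result = result*10 + digit.
import Mathlib
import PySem

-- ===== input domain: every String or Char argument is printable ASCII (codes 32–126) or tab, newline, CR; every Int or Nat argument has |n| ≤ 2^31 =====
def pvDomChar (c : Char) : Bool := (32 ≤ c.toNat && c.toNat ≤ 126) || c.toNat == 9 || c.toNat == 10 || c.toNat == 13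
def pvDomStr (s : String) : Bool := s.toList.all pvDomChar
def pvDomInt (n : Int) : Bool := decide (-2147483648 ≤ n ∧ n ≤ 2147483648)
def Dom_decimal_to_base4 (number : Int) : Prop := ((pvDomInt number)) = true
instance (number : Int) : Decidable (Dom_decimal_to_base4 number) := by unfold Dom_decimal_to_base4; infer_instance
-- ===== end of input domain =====

-- B replaces A's LSB-first loop (remainder * growing multiplier) by an MSD-first
-- conversion that first finds the largest power of 4 <= number; objective: alternative.


-- ===== PORT A =====
-- while loop of A as structural recursion over the same state (number, base4, multiplier)
def decimal_to_base4_loop (number base4 multiplier : Int) : Int :=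
  if h : number > 0 then
    decimal_to_base4_loop (PySem.Int.floordiv number 4)
      (base4 + PySem.Int.mod number 4 * multiplier) (multiplier * 10)
  else
    base4
termination_by number.toNat
decreasing_by
  have h4 : PySem.Int.floordiv number 4 = number / 4 :=
    PySem.Int.floordiv_eq_ediv_of_pos (by norm_num)
  omega

def decimal_to_base4 (number : Int) : Int :=
  decimal_to_base4_loop number 0 1

-- ===== PORT B =====
-- 'while power * 4 <= number: power *= 4'  (the '0 < power' conjunct only makes the
-- recursion total; every call site has 0 < power, where it is no restriction)
def dtb4_findpow (power number : Int) : Int :=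
  if h : power * 4 ≤ number ∧ 0 < power then dtb4_findpow (power * 4) number
  else power
termination_by (number - power).toNat
decreasing_by omega

-- 'while power >= 1: result = result*10 + number // power; number %= power; power //= 4'
def dtb4_msdLoop (power number result : Int) : Int :=
  if h : power ≥ 1 then
    dtb4_msdLoop (PySem.Int.floordiv power 4) (PySem.Int.mod number power)
      (result * 10 + PySem.Int.floordiv number power)
  else result
termination_by power.toNat
decreasing_by
  have h4 : PySem.Int.floordiv power 4 = power / 4 :=
    PySem.Int.floordiv_eq_ediv_of_pos (by norm_num)
  omega

def decimal_to_base4_alt (number : Int) : Int :=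
  if number ≤ 0 then 0
  else dtb4_msdLoop (dtb4_findpow 1 number) number 0

-- ===== PRECONDITION & SPEC =====
def Spec_decimal_to_base4 (number : Int) (out : Int) : Prop := out = decimal_to_base4_alt number
instance (number : Int) (out : Int) : Decidable (Spec_decimal_to_base4 number out) := by unfold Spec_decimal_to_base4; infer_instance

-- ===== CLAIM (what is proved, stated in full; the proofs are below) =====
def Claim_equal_decimal_to_base4 : Prop := ∀ (number : Int), Dom_decimal_to_base4 number → Spec_decimal_to_base4 number (decimal_to_base4 number)

-- ===== LEMMAS AND PROOFS =====

-- proof-only reference function: the packed base-4 value, LSB recursion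
def dtb4_ref (n : Int) : Int :=
  if h : n ≤ 0 then 0
  else dtb4_ref (n / 4) * 10 + n % 4
termination_by n.toNat
decreasing_by omega

theorem dtb4_ref_unfold (n : Int) (hn : 0 ≤ n) :
    dtb4_ref n = dtb4_ref (n / 4) * 10 + n % 4 := by
  rcases lt_or_eq_of_le hn with h | h
  · rw [dtb4_ref, dif_neg (by omega)]
  · rw [dtb4_ref, dif_pos (by omega)]
    norm_num [← h]
    rw [dtb4_ref, dif_pos le_rfl]

-- A's loop computes base4 + multiplier * ref
theorem decimal_to_base4_loop_eq (number base4 multiplier : Int) :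
    decimal_to_base4_loop number base4 multiplier
      = base4 + multiplier * dtb4_ref number := by
  by_cases h : number > 0
  · have h4 : PySem.Int.floordiv number 4 = number / 4 :=
      PySem.Int.floordiv_eq_ediv_of_pos (by norm_num)
    have hm : PySem.Int.mod number 4 = number % 4 :=
      PySem.Int.mod_eq_emod_of_pos (by norm_num)
    have ih := decimal_to_base4_loop_eq (PySem.Int.floordiv number 4)
      (base4 + PySem.Int.mod number 4 * multiplier) (multiplier * 10)
    rw [decimal_to_base4_loop, dif_pos h, ih, h4, hm]
    conv_rhs => rw [dtb4_ref, dif_neg (by omega : ¬ number ≤ 0)]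
    ring
  · rw [decimal_to_base4_loop, dif_neg h, dtb4_ref, dif_pos (by omega : number ≤ 0)]
    ring
termination_by number.toNat
decreasing_by
  have : PySem.Int.floordiv number 4 = number / 4 :=
    PySem.Int.floordiv_eq_ediv_of_pos (by norm_num)
  omega

-- digit splitting: ref of n is ref of its top part shifted, plus ref of the low part
theorem dtb4_ref_split (k : Nat) (n : Int) (hn : 0 ≤ n) :
    dtb4_ref n = dtb4_ref (n / 4 ^ k) * 10 ^ k + dtb4_ref (n % 4 ^ k) := by
  induction k generalizing n with
  | zero =>
    have h0 : dtb4_ref 0 = 0 := by rw [dtb4_ref]; norm_num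
    simp [pow_zero, h0]
  | succ k ih =>
    have h4 : (0:Int) < 4 ^ (k + 1) := by positivity
    have hq : 0 ≤ n / 4 := Int.ediv_nonneg hn (by norm_num)
    have hdivdiv : n / 4 ^ (k + 1) = n / 4 / 4 ^ k := by
      rw [Int.ediv_ediv_of_nonneg (by norm_num : (0:ℤ) ≤ 4), ← pow_succ']
    have hmod : n % 4 ^ (k + 1) = (n / 4 % 4 ^ k) * 4 + n % 4 := by
      obtain ⟨m, rfl⟩ := Int.eq_ofNat_of_zero_le hn
      have h := Nat.mod_mul (a := 4) (b := 4 ^ k) (x := m)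
      have h' : (m:Int) % (4 * 4 ^ k) = (m:Int) % 4 + 4 * ((m:Int) / 4 % 4 ^ k) := by
        exact_mod_cast h
      rw [pow_succ']
      linarith [h']
    have hmodnn : 0 ≤ n / 4 % 4 ^ k := Int.emod_nonneg _ (by positivity)
    have hlow : dtb4_ref (n % 4 ^ (k + 1))
        = dtb4_ref (n / 4 % 4 ^ k) * 10 + n % 4 := by
      rw [hmod, dtb4_ref_unfold _ (by omega)]
      have e1 : ((n / 4 % 4 ^ k) * 4 + n % 4) / 4 = n / 4 % 4 ^ k := by omega
      have e2 : ((n / 4 % 4 ^ k) * 4 + n % 4) % 4 = n % 4 := by omega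
      rw [e1, e2]
    rw [dtb4_ref_unfold n hn, ih (n / 4) hq, hdivdiv, hlow]
    ring
-- ref is the identity on single digits
theorem dtb4_ref_digit (d : Int) (h0 : 0 ≤ d) (h4 : d < 4) :
    dtb4_ref d = d := by
  rw [dtb4_ref_unfold d h0]
  have h1 : d / 4 = 0 := by omega
  have h2 : dtb4_ref 0 = 0 := by rw [dtb4_ref]; norm_num
  rw [h1, h2]
  omega

-- the MSD loop started at power 4^k computes result * 10^(k+1) + ref n, for n < 4^(k+1)
theorem dtb4_msdLoop_eq (k : Nat) (n r : Int) (hn : 0 ≤ n) (hub : n < 4 ^ (k + 1)) :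
    dtb4_msdLoop ((4:Int) ^ k) n r = r * 10 ^ (k + 1) + dtb4_ref n := by
  induction k generalizing n r with
  | zero =>
    have hf1 : PySem.Int.floordiv n 1 = n := by
      rw [PySem.Int.floordiv_eq_ediv_of_pos (by norm_num)]; omega
    have hm1 : PySem.Int.mod n 1 = 0 := by
      rw [PySem.Int.mod_eq_emod_of_pos (by norm_num)]; omega
    have hf14 : PySem.Int.floordiv 1 4 = 0 := by
      rw [PySem.Int.floordiv_eq_ediv_of_pos (by norm_num)]; decide
    have h40 : ((4:Int) ^ (0:Nat)) = 1 := by norm_num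
    rw [h40, dtb4_msdLoop, dif_pos (by norm_num), hf14, hm1, hf1,
        dtb4_msdLoop, dif_neg (by norm_num)]
    have hdig : dtb4_ref n = n := dtb4_ref_digit n hn (by norm_num at hub; omega)
    rw [hdig]
    ring
  | succ k ih =>
    have hp : (0:Int) < 4 ^ (k + 1) := by positivity
    rw [dtb4_msdLoop, dif_pos (by omega : (4:Int) ^ (k+1) ≥ 1)]
    have hd4 : PySem.Int.floordiv ((4:Int) ^ (k + 1)) 4 = 4 ^ k := by
      rw [PySem.Int.floordiv_eq_ediv_of_pos (by norm_num), pow_succ]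
      omega
    have hm : PySem.Int.mod n ((4:Int) ^ (k + 1)) = n % 4 ^ (k + 1) :=
      PySem.Int.mod_eq_emod_of_pos hp
    have hq : PySem.Int.floordiv n ((4:Int) ^ (k + 1)) = n / 4 ^ (k + 1) :=
      PySem.Int.floordiv_eq_ediv_of_pos hp
    rw [hd4, hm, hq, ih (n % 4 ^ (k + 1)) _ (Int.emod_nonneg _ (by positivity))
        (Int.emod_lt_of_pos _ hp)]
    have hsplit := dtb4_ref_split (k + 1) n hn
    have htop : dtb4_ref (n / 4 ^ (k + 1)) = n / 4 ^ (k + 1) := by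
      apply dtb4_ref_digit _ (Int.ediv_nonneg hn (by positivity))
      rw [Int.ediv_lt_iff_lt_mul hp, ← pow_succ']
      exact hub
    rw [hsplit, htop]
    ring

-- findpow started at 4^j returns a power 4^m with 4^m ≤ n < 4^(m+1)
theorem dtb4_findpow_spec (j : Nat) (n : Int) (h1 : (4:Int) ^ j ≤ n) :
    ∃ m : Nat, dtb4_findpow ((4:Int) ^ j) n = 4 ^ m ∧ 4 ^ m ≤ n ∧ n < 4 ^ (m + 1) := by
  have hp : (0:Int) < 4 ^ j := by positivity
  by_cases h : (4:Int) ^ j * 4 ≤ n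
  · rw [dtb4_findpow, dif_pos ⟨h, hp⟩]
    have h' : (4:Int) ^ (j + 1) ≤ n := by rw [pow_succ]; exact h
    have := dtb4_findpow_spec (j + 1) n h'
    rwa [pow_succ] at this
  · refine ⟨j, ?_, h1, ?_⟩
    · rw [dtb4_findpow, dif_neg (by tauto)]
    · rw [pow_succ]; omega
termination_by (n - 4 ^ j).toNat
decreasing_by
  have : (0:Int) < 4 ^ j := by positivity
  omega

-- ===== VERDICT (by name: the statement is the Claim_ definition above) =====
theorem decimal_to_base4_spec : Claim_equal_decimal_to_base4 := by
  intro number _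
  show decimal_to_base4 number = decimal_to_base4_alt number
  rw [decimal_to_base4, decimal_to_base4_loop_eq, decimal_to_base4_alt]
  by_cases h : number ≤ 0
  · rw [if_pos h, dtb4_ref, dif_pos h]
    ring
  · rw [if_neg h]
    have h1 : (4:Int) ^ (0:Nat) ≤ number := by norm_num; omega
    obtain ⟨m, hfp, hle, hlt⟩ := dtb4_findpow_spec 0 number h1
    rw [show (1:Int) = (4:Int) ^ (0:Nat) by norm_num, hfp,
        dtb4_msdLoop_eq m number 0 (by omega) hlt]
    ring
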